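-- pv_equiv track=rewrite | github.com/Guanjinqu/StairLoop | utilities.py | get_b_list
-- ===== SOURCE A (Python) =====
-- def get_b_list(x):
--     arr_0 = []
--     arr_1 = []
--     if x == 0 :
--         return [0],[0]
--     else:
--         while x > 0:
--             arr_0.append(x%2)
--             x = x >> 1
--             arr_1.append(x%2)
--             x = x >> 1
--         return list(reversed(arr_1)),list(reversed(arr_0))
-- ===== SOURCE B (Python) =====
-- def get_b_list(x):
--     if x == 0:
--         return [0], [0]
--     b = []
--     while x > 0:
--         b.append(x % 2)
--         x >>= 1
--     if len(b) % 2 == 1: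
--         b.append(0)
--     even = b[0::2]
--     odd = b[1::2]
--     return list(reversed(odd)), list(reversed(even))
-- ===== Notes on version B (the rewrite author's own statement) =====
-- stated objective: simpler
-- what changed: Instead of a two-bits-per-iteration loop maintaining two accumulator lists, B extracts the full LSB-first bit list in one single-bit loop, pads it to even length, and deinterleaves it with parity slices b[0::2]/b[1::2].
import Mathlib
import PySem

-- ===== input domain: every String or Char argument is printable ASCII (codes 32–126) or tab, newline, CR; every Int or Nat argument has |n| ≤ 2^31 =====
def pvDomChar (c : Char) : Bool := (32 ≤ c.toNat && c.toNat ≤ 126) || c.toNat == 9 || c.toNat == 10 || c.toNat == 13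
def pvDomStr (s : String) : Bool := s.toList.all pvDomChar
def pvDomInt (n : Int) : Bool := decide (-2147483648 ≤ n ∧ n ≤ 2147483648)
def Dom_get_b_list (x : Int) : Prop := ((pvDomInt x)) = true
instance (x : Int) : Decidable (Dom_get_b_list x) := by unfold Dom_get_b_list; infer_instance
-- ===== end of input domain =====

-- B differs from A by extracting the bit list in a single-bit loop, padding it to even
-- length, and deinterleaving with parity slices; objective: simpler.

-- ===== PORT A =====
-- the while-loop: two appends and two right-shifts per iteration
def getbLoop (x : Int) (a0 a1 : List Int) : List Int × List Int :=
  if _hx : 0 < x then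
    getbLoop (PySem.Int.floordiv (PySem.Int.floordiv x 2) 2)
      (a0 ++ [PySem.Int.mod x 2])
      (a1 ++ [PySem.Int.mod (PySem.Int.floordiv x 2) 2])
  else (a1.reverse, a0.reverse)
termination_by x.toNat
decreasing_by
  simp only [PySem.Int.floordiv_eq_ediv_of_pos (show (0:Int) < 2 by norm_num)]
  omega

def get_b_list (x : Int) : List Int × List Int :=
  if x == 0 then ([0], [0]) else getbLoop x [] []

-- ===== PORT B =====
-- the while-loop of Source B: one bit per iteration, LSB first
def bitsLSB (x : Int) : List Int :=
  if _hx : 0 < x then PySem.Int.mod x 2 :: bitsLSB (PySem.Int.floordiv x 2) else []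
termination_by x.toNat
decreasing_by
  simp only [PySem.Int.floordiv_eq_ediv_of_pos (show (0:Int) < 2 by norm_num)]
  omega

-- hand port of the step-2 slice l[0::2] (exact: every second element of l)
def sliceStep2 : List Int → List Int
  | [] => []
  | a :: t => a :: sliceStep2 (t.drop 1)
termination_by l => l.length
decreasing_by simp

def get_b_list_alt (x : Int) : List Int × List Int :=
  if x == 0 then ([0], [0])
  else
    let b0 := bitsLSB x
    let b := if b0.length % 2 == 1 then b0 ++ [0] else b0
    let even := sliceStep2 b            -- b[0::2]
    let odd := sliceStep2 (b.drop 1)    -- b[1::2]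
    (odd.reverse, even.reverse)

-- ===== PRECONDITION & SPEC =====
def Spec_get_b_list (x : Int) (out : List Int × List Int) : Prop := out = get_b_list_alt x
instance (x : Int) (out : List Int × List Int) : Decidable (Spec_get_b_list x out) := by unfold Spec_get_b_list; infer_instance

-- ===== CLAIM (what is proved, stated in full; the proofs are below) =====
def Claim_equal_get_b_list : Prop := ∀ (x : Int), Dom_get_b_list x → Spec_get_b_list x (get_b_list x)

-- ===== LEMMAS AND PROOFS =====

-- bits at even positions (A's arr_0) and odd positions (A's arr_1)
def evs (x : Int) : List Int :=
  if 0 < x then PySem.Int.mod x 2 :: evs (PySem.Int.floordiv (PySem.Int.floordiv x 2) 2) else []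
termination_by x.toNat
decreasing_by
  simp only [PySem.Int.floordiv_eq_ediv_of_pos (show (0:Int) < 2 by norm_num)]
  omega

def ods (x : Int) : List Int :=
  if 0 < x then PySem.Int.mod (PySem.Int.floordiv x 2) 2 ::
    ods (PySem.Int.floordiv (PySem.Int.floordiv x 2) 2) else []
termination_by x.toNat
decreasing_by
  simp only [PySem.Int.floordiv_eq_ediv_of_pos (show (0:Int) < 2 by norm_num)]
  omega

theorem getbLoop_eq (x : Int) (a0 a1 : List Int) :
    getbLoop x a0 a1 = ((a1 ++ ods x).reverse, (a0 ++ evs x).reverse) := by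
  by_cases hx : 0 < x
  · rw [getbLoop, evs, ods]
    simp only [hx, if_pos, dif_pos]
    rw [getbLoop_eq]
    simp
  · rw [getbLoop, evs, ods]
    simp [hx]
termination_by x.toNat
decreasing_by
  simp only [PySem.Int.floordiv_eq_ediv_of_pos (show (0:Int) < 2 by norm_num)]
  omega

-- the padded bit list of Source B
def pad (x : Int) : List Int :=
  if (bitsLSB x).length % 2 == 1 then bitsLSB x ++ [0] else bitsLSB x

theorem pad_rec (x : Int) (hx : 0 < x) :
    pad x = PySem.Int.mod x 2 :: PySem.Int.mod (PySem.Int.floordiv x 2) 2 ::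
      pad (PySem.Int.floordiv (PySem.Int.floordiv x 2) 2) := by
  have h2 : (0:Int) < 2 := by norm_num
  by_cases h1 : 0 < PySem.Int.floordiv x 2
  · unfold pad
    rw [bitsLSB, dif_pos hx, bitsLSB, dif_pos h1]
    generalize bitsLSB (PySem.Int.floordiv (PySem.Int.floordiv x 2) 2) = L
    simp only [List.length_cons, beq_iff_eq]
    by_cases hp : L.length % 2 = 1
    · rw [if_pos (by omega), if_pos hp]; simp
    · rw [if_neg (by omega), if_neg hp]
  · have hx1 : x = 1 := by
      have := PySem.Int.floordiv_eq_ediv_of_pos h2 (a := x)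
      omega
    subst hx1
    have hfd : PySem.Int.floordiv (1:Int) 2 = 0 := by
      rw [PySem.Int.floordiv_eq_ediv_of_pos h2]; norm_num
    have hb0 : bitsLSB 0 = [] := by rw [bitsLSB]; simp
    have hb1 : bitsLSB 1 = [PySem.Int.mod 1 2] := by
      rw [bitsLSB, dif_pos (show (0:Int) < 1 by norm_num), hfd, hb0]
    have hfd0 : PySem.Int.floordiv (0:Int) 2 = 0 := by
      rw [PySem.Int.floordiv_eq_ediv_of_pos h2]; norm_num
    rw [hfd, hfd0]
    unfold pad
    rw [hb0, hb1]
    decide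

theorem slice_pad (x : Int) :
    sliceStep2 (pad x) = evs x ∧ sliceStep2 ((pad x).drop 1) = ods x := by
  by_cases hx : 0 < x
  · have IH := slice_pad (PySem.Int.floordiv (PySem.Int.floordiv x 2) 2)
    rw [pad_rec x hx, evs, ods]
    simp only [hx, if_pos]
    constructor
    · simp only [sliceStep2, List.drop_succ_cons, List.drop_zero]
      rw [IH.1]
    · simp only [List.drop_succ_cons, List.drop_zero, sliceStep2]
      rw [IH.2]
  · have hb : bitsLSB x = [] := by rw [bitsLSB, dif_neg hx]
    have hp : pad x = [] := by unfold pad; simp [hb]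
    rw [hp, evs, ods]
    simp [hx, sliceStep2]
termination_by x.toNat
decreasing_by
  simp only [PySem.Int.floordiv_eq_ediv_of_pos (show (0:Int) < 2 by norm_num)]
  omega

-- ===== VERDICT (by name: the statement is the Claim_ definition above) =====
theorem get_b_list_spec : Claim_equal_get_b_list := by
  intro x _
  unfold Spec_get_b_list get_b_list get_b_list_alt
  by_cases h0 : x = 0
  · simp [h0]
  · have hs := slice_pad x
    have hpad : (if (bitsLSB x).length % 2 = 1 then bitsLSB x ++ [0] else bitsLSB x) = pad x := by
      unfold pad; simp
    simp only [beq_iff_eq, h0, if_false]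
    rw [getbLoop_eq, hpad, hs.1, hs.2]
    simp
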